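-- pv_equiv track=rewrite | github.com/IES-Rafael-Alberti/dam1-2425-ejercicios-u2-JoseLuis-S | src/excepciones/ej23_01.py | generar_serie
-- ===== SOURCE A (Python) =====
-- def generar_serie(edad: int) -> str:
--     '''
--     Esta funcion genera la serie de años cumplidos por el usuario
--
--     Args:
--         edad (int): Edad del usuario
--
--     Returns:
--         str: Serie de años cumplidos por el usuario
--     '''
--     serie = ''
--
--     for i in range(1, edad + 1): # Bucle que genera la serie
--         if i == edad:
--             serie += str(i)
--         elif i == (edad - 1):
--             serie += str(i) + ' y '
--         else:
--             serie += str(i) + ', '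
--
--     return serie
-- ===== SOURCE B (Python) =====
-- def generar_serie(edad: int) -> str:
--     nums = [str(i) for i in range(1, edad + 1)]
--     if not nums:
--         return ''
--     if len(nums) == 1:
--         return nums[0]
--     return ', '.join(nums[:-1]) + ' y ' + nums[-1]
-- ===== Notes on version B (the rewrite author's own statement) =====
-- stated objective: idiomatic
-- what changed: Replaces the per-element last/second-to-last/normal branching inside the loop by building the list of number strings once and assembling the result with join over the sliced prefix plus ' y ' plus the last element.
import Mathlib
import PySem

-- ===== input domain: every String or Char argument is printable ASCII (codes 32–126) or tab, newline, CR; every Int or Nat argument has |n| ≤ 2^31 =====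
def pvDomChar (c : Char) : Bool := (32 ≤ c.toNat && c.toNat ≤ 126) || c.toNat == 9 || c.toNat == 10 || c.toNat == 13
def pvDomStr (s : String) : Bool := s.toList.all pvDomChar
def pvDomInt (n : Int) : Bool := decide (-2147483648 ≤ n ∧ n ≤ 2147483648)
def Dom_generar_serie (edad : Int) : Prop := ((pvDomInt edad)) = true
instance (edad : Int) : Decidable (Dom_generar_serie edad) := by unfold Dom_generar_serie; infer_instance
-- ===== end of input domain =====

-- B replaces A's per-element last/second-to-last branching by join over the sliced prefix plus ' y ' plus the last element (idiomatic; same cost).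

-- ===== PORT A =====
def generar_serie (edad : Int) : String :=
  String.ofList ((PySem.List.pyRange 1 (edad + 1)).foldl (fun serie i =>
    if i = edad then serie ++ PySem.Int.toChars i
    else if i = edad - 1 then serie ++ PySem.Int.toChars i ++ [' ', 'y', ' ']
    else serie ++ PySem.Int.toChars i ++ [',', ' ']) [])

-- ===== PORT B =====
def generar_serie_alt (edad : Int) : String :=
  let nums := (PySem.List.pyRange 1 (edad + 1)).map PySem.Int.toChars
  if nums.length = 0 then String.ofList []
  else if nums.length = 1 then String.ofList (PySem.List.pyGetD nums 0 [])
  else String.ofList (PySem.Chars.join [',', ' '] (PySem.List.slice nums none (some (-1)))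
                  ++ [' ', 'y', ' '] ++ PySem.List.pyGetD nums (-1) [])

-- ===== PRECONDITION & SPEC =====
def Spec_generar_serie (edad : Int) (out : String) : Prop := out = generar_serie_alt edad
instance (edad : Int) (out : String) : Decidable (Spec_generar_serie edad out) := by unfold Spec_generar_serie; infer_instance

-- ===== CLAIM (what is proved, stated in full; the proofs are below) =====
def Claim_equal_generar_serie : Prop := ∀ (edad : Int), Dom_generar_serie edad → Spec_generar_serie edad (generar_serie edad)

-- ===== LEMMAS AND PROOFS =====

-- ', '.join over a list with a distinguished last element, as a flatMap of 'elem ++ ", "' over the prefix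
lemma join_append_singleton (l : List (List Char)) (a : List Char) :
    PySem.Chars.join [',', ' '] (l ++ [a])
      = l.flatMap (fun x => x ++ [',', ' ']) ++ a := by
  induction l with
  | nil => simp [PySem.Chars.join_singleton]
  | cons x l ih =>
    cases l with
    | nil =>
      simp [PySem.Chars.join_cons_cons, PySem.Chars.join_singleton]
    | cons y l' =>
      rw [show ((x :: (y :: l')) ++ [a]) = x :: y :: (l' ++ [a]) by simp]
      rw [PySem.Chars.join_cons_cons]
      rw [show (y :: (l' ++ [a])) = ((y :: l') ++ [a]) by simp]
      rw [ih]
      simp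

theorem generar_serie_spec : Claim_equal_generar_serie := by
  intro edad _
  unfold Spec_generar_serie generar_serie generar_serie_alt
  rcases lt_trichotomy edad 1 with hlt | heq | hgt
  · -- edad ≤ 0 : empty range
    rw [PySem.List.pyRange_one_eq_nil (by omega)]
    simp
  · subst heq
    have h1 : PySem.List.pyRange 1 (1 + 1) = [1] := by decide
    rw [h1]
    simp [PySem.List.pyGetD_zero_cons]
  · -- edad ≥ 2
    have hsplit : PySem.List.pyRange 1 (edad + 1)
        = PySem.List.pyRange 1 (edad - 1) ++ [edad - 1, edad] := by
      rw [PySem.List.pyRange_one_append 1 (edad - 1) (edad + 1) (by omega) (by omega)]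
      congr 1
      rw [PySem.List.pyRange_one_cons (by omega), PySem.List.pyRange_one_cons (by omega)]
      rw [show edad - 1 + 1 + 1 = edad + 1 by ring, PySem.List.pyRange_one_eq_nil (by omega)]
      simp [show edad - 1 + 1 = edad by ring]
    rw [hsplit]
    -- A side
    set L := PySem.List.pyRange 1 (edad - 1) with hL
    have hAfold : ∀ acc : List Char,
        L.foldl (fun serie i =>
          if i = edad then serie ++ PySem.Int.toChars i
          else if i = edad - 1 then serie ++ PySem.Int.toChars i ++ [' ', 'y', ' ']
          else serie ++ PySem.Int.toChars i ++ [',', ' ']) acc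
        = acc ++ L.flatMap (fun i => PySem.Int.toChars i ++ [',', ' ']) := by
      intro acc
      rw [PySem.List.foldl_congr_mem L _ (fun serie i => serie ++ (PySem.Int.toChars i ++ [',', ' '])) acc]
      · exact PySem.List.foldl_append_eq_flatMap _ L acc
      · intro acc' x hx
        have hb := (PySem.List.mem_pyRange_one).mp hx
        have hx1 : x ≠ edad := by omega
        have hx2 : x ≠ edad - 1 := by omega
        simp [hx1, hx2]
    have h1 : ¬ (edad - 1 = edad) := by omega
    rw [List.foldl_append]
    simp only [List.foldl_cons, List.foldl_nil, hAfold, if_neg h1]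
    -- B side
    have hmap : (L ++ [edad - 1, edad]).map PySem.Int.toChars
        = (L.map PySem.Int.toChars ++ [PySem.Int.toChars (edad - 1)]) ++ [PySem.Int.toChars edad] := by
      simp
    rw [hmap, PySem.List.slice_to_neg_one, PySem.List.pyGetD_neg_one_append_singleton]
    rw [List.dropLast_concat, join_append_singleton, List.flatMap_map]
    simp

-- ===== VERDICT (by name: the statement is the Claim_ definition above) =====
-- (theorem above proves Claim_equal_generar_serie)
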